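-- pv_equiv track=rewrite | github.com/aspektr/python_algorithms | 7_dynamic_programming.py | binary_sequence
-- ===== SOURCE A (Python) =====
-- def binary_sequence(n: int):
--     """
--     How many ways are exist to make up sequence consisting of 1 and 0,
--     having length = n, so that 1 or 0 does not repeat more than 2 times?
--     :param n: int length
--     :return: int number of ways
--
--     a[i][k] - number of ways to make up sequence, having length = n,
--               and ended k
--
--              |
--     F(i,k) = | F(i-1,1-k) + F(i-2, 1-k) + 1
--              | k = [0,1]
--     """
--     f = [[0]*2 for _ in range(n+1)]
--     f[1][0] = 1
--     f[1][1] = 1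
--     f[2][0] = 2
--     f[2][1] = 2
--     for i in range(3, n+1):
--         for k in range(2):
--             f[i][k] = f[i-1][1-k] + f[i-2][1-k]
--     return f[-1][-1]
-- ===== SOURCE B (Python) =====
-- def binary_sequence(n):
--     # Fast-doubling Fibonacci: the answer for length n is Fib(n+1).
--     def fib(m):
--         if m == 0:
--             return (0, 1)
--         a, b = fib(m // 2)
--         c = a * (2 * b - a)
--         d = a * a + b * b
--         if m % 2 == 0:
--             return (c, d)
--         return (d, c + d)
--     return fib(n + 1)[0]
-- ===== Notes on version B (the rewrite author's own statement) =====
-- stated objective: faster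
-- what changed: Replaced the O(n) DP table (the answer is the Fibonacci number Fib(n+1)) by fast-doubling Fibonacci recursion.
-- crash fix: For n in {-1,0,1} A raises IndexError (the table has fewer than 3 rows); B returns Fib(n+1), i.e. 0,1,1. — e.g. on binary_sequence(0): A raises IndexError, B returns 1
import Mathlib
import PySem

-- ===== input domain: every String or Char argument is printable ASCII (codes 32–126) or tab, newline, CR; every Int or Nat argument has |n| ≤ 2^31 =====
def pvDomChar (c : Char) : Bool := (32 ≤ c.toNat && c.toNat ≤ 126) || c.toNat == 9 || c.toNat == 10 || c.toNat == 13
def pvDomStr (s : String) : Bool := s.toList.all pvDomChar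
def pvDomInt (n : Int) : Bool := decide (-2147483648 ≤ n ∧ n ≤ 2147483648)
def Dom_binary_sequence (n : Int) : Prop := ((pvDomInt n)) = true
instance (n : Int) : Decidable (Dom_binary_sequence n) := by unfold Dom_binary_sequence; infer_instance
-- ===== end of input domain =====

-- B replaces A's O(n) two-column DP table by fast-doubling Fibonacci recursion (the answer is Fib(n+1)).

-- ===== PORT A =====
-- Python-list indexing on the table, hand-ported (exact for in-range indices, negative = from the end;
-- Python raises IndexError out of range — those inputs are excluded by Pre_)
def tblGet (f : Array (List Int)) (i : Int) : List Int :=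
  let j := if i < 0 then i + f.size else i
  f.getD j.toNat []

def tblSet (f : Array (List Int)) (i : Int) (v : List Int) : Array (List Int) :=
  let j := if i < 0 then i + f.size else i
  f.setIfInBounds j.toNat v

-- `f[i][k] = v` on the table (rows are Python lists, indexed via PySem)
def setCell (f : Array (List Int)) (i k : Int) (v : Int) : Array (List Int) :=
  tblSet f i (PySem.List.pySetD (tblGet f i) k v)

-- inner `for k in range(2)` body: f[i][k] = f[i-1][1-k] + f[i-2][1-k]
def stepA (f : Array (List Int)) (i : Int) : Array (List Int) :=
  (PySem.List.pyRange 0 2 1).foldl (fun f k =>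
    setCell f i k
      (PySem.List.pyGetD (tblGet f (i - 1)) (1 - k) 0 +
       PySem.List.pyGetD (tblGet f (i - 2)) (1 - k) 0)) f

def binary_sequence (n : Int) : Int :=
  -- f = [[0]*2 for _ in range(n+1)]
  let f0 := ((PySem.List.pyRange 0 (n + 1) 1).map (fun _ => ([0, 0] : List Int))).toArray
  -- f[1][0] = 1 ; f[1][1] = 1 ; f[2][0] = 2 ; f[2][1] = 2   (in range under Pre_)
  let f1 := setCell f0 1 0 1
  let f2 := setCell f1 1 1 1
  let f3 := setCell f2 2 0 2
  let f4 := setCell f3 2 1 2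
  -- for i in range(3, n+1): for k in range(2): ...
  let f5 := (PySem.List.pyRange 3 (n + 1) 1).foldl stepA f4
  -- return f[-1][-1]
  PySem.List.pyGetD (tblGet f5 (-1)) (-1) 0

-- ===== PORT B =====
-- fast doubling: fastFib m = (Fib m, Fib (m+1))
def fastFib (m : Nat) : Int × Int :=
  if h : m = 0 then (0, 1)
  else
    let p := fastFib (m / 2)
    let a := p.1
    let b := p.2
    let c := a * (2 * b - a)
    let d := a * a + b * b
    if m % 2 == 0 then (c, d) else (d, c + d)
decreasing_by exact Nat.div_lt_self (Nat.pos_of_ne_zero h) one_lt_two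

def binary_sequence_alt (n : Int) : Int := (fastFib (n + 1).toNat).1

-- ===== PRECONDITION & SPEC =====
-- A raises IndexError for every n ≤ 1 (the table then has fewer than 3 rows); those inputs are excluded.
def Pre_binary_sequence (n : Int) : Prop := 2 ≤ n
instance (n : Int) : Decidable (Pre_binary_sequence n) := by unfold Pre_binary_sequence; infer_instance
def pvWitness_binary_sequence : Int := 5

-- For n in {-1, 0, 1} A raises IndexError; B returns Fib(n+1), i.e. 0, 1, 1.
def Raises_binary_sequence (n : Int) : Prop := -1 ≤ n ∧ n ≤ 1
instance (n : Int) : Decidable (Raises_binary_sequence n) := by unfold Raises_binary_sequence; infer_instance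
def pvRaiseWitness_binary_sequence : Int := 0
def pvRaiseWitnessOut_binary_sequence : Int := 1

def Spec_binary_sequence (n : Int) (out : Int) : Prop := out = binary_sequence_alt n
instance (n : Int) (out : Int) : Decidable (Spec_binary_sequence n out) := by unfold Spec_binary_sequence; infer_instance

-- ===== CLAIM =====
def Claim_equal_binary_sequence : Prop := ∀ (n : Int), Dom_binary_sequence n → Pre_binary_sequence n → Spec_binary_sequence n (binary_sequence n)
def Claim_raises_binary_sequence : Prop := (∀ (n : Int), Dom_binary_sequence n → Raises_binary_sequence n → ¬ Pre_binary_sequence n) ∧ (Dom_binary_sequence (pvRaiseWitness_binary_sequence) ∧ Raises_binary_sequence (pvRaiseWitness_binary_sequence) ∧ binary_sequence_alt (pvRaiseWitness_binary_sequence) = pvRaiseWitnessOut_binary_sequence)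

-- ===== LEMMAS AND PROOFS =====

-- B's fast-doubling pair is (Fib m, Fib (m+1))
theorem fastFib_eq (m : Nat) : fastFib m = ((Nat.fib m : Int), (Nat.fib (m + 1) : Int)) := by
  induction m using Nat.strong_induction_on with
  | _ m ih =>
    rw [fastFib]
    by_cases h : m = 0
    · simp [h]
    · have hlt : m / 2 < m := Nat.div_lt_self (Nat.pos_of_ne_zero h) one_lt_two
      rw [dif_neg h, ih (m / 2) hlt]
      simp only []
      by_cases he : m % 2 = 0
      · obtain ⟨k, rfl⟩ : ∃ k, m = 2 * k := ⟨m / 2, by omega⟩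
        have h2 : 2 * k / 2 = k := by omega
        have hm2 : (2 * k) % 2 = 0 := by omega
        rw [h2]
        simp only [hm2, beq_self_eq_true, if_true, Prod.mk.injEq]
        have hle : Nat.fib k ≤ 2 * Nat.fib (k + 1) := by
          have := Nat.fib_le_fib_succ (n := k); omega
        refine ⟨?_, ?_⟩
        · rw [Nat.fib_two_mul, Nat.cast_mul, Nat.cast_sub hle]; push_cast; ring
        · rw [show 2 * k + 1 = 2 * k + 1 from rfl, Nat.fib_two_mul_add_one]; push_cast; ring
      · obtain ⟨k, rfl⟩ : ∃ k, m = 2 * k + 1 := ⟨m / 2, by omega⟩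
        have h2 : (2 * k + 1) / 2 = k := by omega
        have hm2 : (2 * k + 1) % 2 = 1 := by omega
        rw [h2]
        simp only [hm2]
        norm_num
        have hle : Nat.fib k ≤ 2 * Nat.fib (k + 1) := by
          have := Nat.fib_le_fib_succ (n := k); omega
        have e1 : (Nat.fib (2 * k) : Int) = (Nat.fib k : Int) * (2 * Nat.fib (k + 1) - Nat.fib k) := by
          rw [Nat.fib_two_mul, Nat.cast_mul, Nat.cast_sub hle]; push_cast; ring
        have e2 : (Nat.fib (2 * k + 1) : Int) = (Nat.fib k : Int) * Nat.fib k + (Nat.fib (k + 1) : Int) * Nat.fib (k + 1) := by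
          rw [Nat.fib_two_mul_add_one]; push_cast; ring
        have e3 : Nat.fib (2 * k + 1 + 1) = Nat.fib (2 * k) + Nat.fib (2 * k + 1) := by
          have := Nat.fib_add_two (n := 2 * k); omega
        refine ⟨e2.symm, ?_⟩
        rw [e3]; push_cast [e1, e2]; ring

-- value stored in row i of A's table (for 1 ≤ i): G i = Fib (i+1)
def G (i : Nat) : Int := (Nat.fib (i + 1) : Int)

-- the table after all rows 1 ≤ j < m have been filled
def expT (m len : Nat) : List (List Int) :=
  (List.range len).map (fun j => if 1 ≤ j ∧ j < m then [G j, G j] else [0, 0])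

theorem G_rec (m : Nat) (h : 3 ≤ m) : G (m - 1) + G (m - 2) = G m := by
  obtain ⟨k, rfl⟩ : ∃ k, m = k + 3 := ⟨m - 3, by omega⟩
  have e1 : k + 3 - 1 = k + 2 := by omega
  have e2 : k + 3 - 2 = k + 1 := by omega
  have h4 : Nat.fib (k + 2 + 2) = Nat.fib (k + 2) + Nat.fib (k + 2 + 1) := Nat.fib_add_two
  unfold G
  rw [e1, e2, show k + 3 + 1 = k + 2 + 2 by omega, h4, show k + 2 + 1 = k + 3 by omega]
  push_cast; ring

theorem length_expT (m len : Nat) : (expT m len).length = len := by simp [expT]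

theorem getD_expT (m len j : Nat) (hj : j < len) :
    (expT m len).getD j [] = if 1 ≤ j ∧ j < m then [G j, G j] else [0, 0] := by
  simp [expT, List.getD_eq_getElem?_getD, hj]

theorem getD_set_self (l : List (List Int)) (i : Nat) (v : List Int) (h : i < l.length) :
    (l.set i v).getD i [] = v := by
  simp [List.getD_eq_getElem?_getD, h]

theorem getD_set_ne (l : List (List Int)) (i j : Nat) (v : List Int) (h : i ≠ j) :
    (l.set i v).getD j [] = l.getD j [] := by
  simp [List.getD_eq_getElem?_getD, h]

theorem pget0 (a b d : Int) : PySem.List.pyGetD [a, b] 0 d = a := PySem.List.pyGetD_zero_cons _ _ _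
theorem pget1 (a b d : Int) : PySem.List.pyGetD [a, b] 1 d = b := by
  rw [show (1 : Int) = ((1 : Nat) : Int) from rfl, PySem.List.pyGetD_natCast]; rfl
theorem pgetm1 (a b d : Int) : PySem.List.pyGetD [a, b] (-1) d = b := by
  rw [show ([a, b] : List Int) = [a] ++ [b] from rfl, PySem.List.pyGetD_neg_one_append_singleton]
theorem pset0 (a b v : Int) : PySem.List.pySetD [a, b] 0 v = [v, b] := by
  rw [show (0 : Int) = ((0 : Nat) : Int) from rfl, PySem.List.pySetD_natCast]; rfl
theorem pset1 (a b v : Int) : PySem.List.pySetD [a, b] 1 v = [a, v] := by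
  rw [show (1 : Int) = ((1 : Nat) : Int) from rfl, PySem.List.pySetD_natCast]; rfl

theorem getD_toArray (l : List (List Int)) (i : Nat) (d : List Int) :
    l.toArray.getD i d = l.getD i d := by
  rw [Array.getD_eq_getD_getElem?]
  simp [List.getD_eq_getElem?_getD]

theorem tblGet_cast (l : List (List Int)) (i : Nat) :
    tblGet l.toArray (i : Int) = l.getD i [] := by
  simp only [tblGet, if_neg (by omega : ¬ ((i : Int) < 0)), Int.toNat_natCast]
  exact getD_toArray l i []

theorem tblSet_cast (l : List (List Int)) (i : Nat) (v : List Int) :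
    tblSet l.toArray (i : Int) v = (l.set i v).toArray := by
  simp only [tblSet, if_neg (by omega : ¬ ((i : Int) < 0)), Int.toNat_natCast]
  exact List.setIfInBounds_toArray l i v

theorem tblGet_neg_one (l : List (List Int)) : tblGet l.toArray (-1) = l.getD (l.length - 1) [] := by
  simp only [tblGet, if_pos (by norm_num : (-1 : Int) < 0), List.size_toArray]
  rw [show ((-1 : Int) + l.length).toNat = l.length - 1 by omega]
  exact getD_toArray l (l.length - 1) []

theorem setCell_cast (l : List (List Int)) (i : Nat) (k v : Int) :
    setCell l.toArray (i : Int) k v = (l.set i (PySem.List.pySetD (l.getD i []) k v)).toArray := by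
  rw [setCell, tblGet_cast, tblSet_cast]

-- one outer-loop iteration fills row m
theorem getElem?_set_self' (l : List (List Int)) (i : Nat) (v : List Int) (h : i < l.length) :
    (l.set i v)[i]? = some v := by
  simp [h]

theorem getElem?_set_ne' (l : List (List Int)) (i j : Nat) (v : List Int) (h : i ≠ j) :
    (l.set i v)[j]? = l[j]? := by
  simp [h]

theorem getElem?_expT (m len j : Nat) (hj : j < len) :
    (expT m len)[j]? = some (if 1 ≤ j ∧ j < m then [G j, G j] else [0, 0]) := by
  simp [expT, hj]

theorem getElem?_expT_none (m len j : Nat) (hj : ¬ j < len) : (expT m len)[j]? = none := by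
  apply List.getElem?_eq_none
  rw [length_expT]; omega

theorem step_exp (len m : Nat) (h3 : 3 ≤ m) (hm : m < len) :
    stepA (expT m len).toArray (m : Int) = (expT (m + 1) len).toArray := by
  have c1 : ((m : Int) - 1) = ((m - 1 : Nat) : Int) := by omega
  have c2 : ((m : Int) - 2) = ((m - 2 : Nat) : Int) := by omega
  have hTm : (expT m len).getD m [] = [0, 0] := by
    rw [getD_expT m len m hm]; simp
  have hTm1 : (expT m len).getD (m - 1) [] = [G (m - 1), G (m - 1)] := by
    rw [getD_expT m len (m - 1) (by omega)]; have : 1 ≤ m - 1 ∧ m - 1 < m := by omega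
    simp [this]
  have hTm2 : (expT m len).getD (m - 2) [] = [G (m - 2), G (m - 2)] := by
    rw [getD_expT m len (m - 2) (by omega)]; have : 1 ≤ m - 2 ∧ m - 2 < m := by omega
    simp [this]
  unfold stepA
  rw [show PySem.List.pyRange 0 2 1 = [0, 1] by decide]
  simp only [List.foldl_cons, List.foldl_nil]
  rw [c1, c2]
  simp only [show (1 : Int) - 0 = 1 from by norm_num, show (1 : Int) - 1 = 0 from by norm_num]
  rw [tblGet_cast, tblGet_cast, hTm1, hTm2, pget1, pget1]
  rw [setCell_cast (expT m len) m]
  rw [hTm, pset0]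
  rw [tblGet_cast, tblGet_cast]
  rw [getD_set_ne _ _ _ _ (show m ≠ m - 1 by omega), getD_set_ne _ _ _ _ (show m ≠ m - 2 by omega)]
  rw [hTm1, hTm2, pget0, pget0]
  rw [setCell_cast]
  rw [getD_set_self _ _ _ (by rw [length_expT]; exact hm), pset1, List.set_set]
  rw [G_rec m h3]
  congr 1
  apply List.ext_getElem?
  intro j
  by_cases hjl : j < len
  · by_cases hj : j = m
    · rw [hj] at hjl ⊢
      rw [getElem?_set_self' _ _ _ (by rw [length_expT]; exact hjl), getElem?_expT _ _ _ hjl]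
      have hc : 1 ≤ m ∧ m < m + 1 := by omega
      rw [if_pos hc]
    · rw [getElem?_set_ne' _ _ _ _ (fun hh => hj hh.symm)]
      rw [getElem?_expT _ _ _ hjl, getElem?_expT _ _ _ hjl]
      have hiff : (1 ≤ j ∧ j < m) ↔ (1 ≤ j ∧ j < m + 1) := by omega
      simp only [hiff]
  · rw [getElem?_set_ne' _ _ _ _ (by omega : m ≠ j)]
    rw [getElem?_expT_none _ _ _ hjl, getElem?_expT_none _ _ _ hjl]

-- the whole outer loop builds the filled table
theorem loop_inv (len m : Nat) (h3 : 3 ≤ m) (hm : m ≤ len) :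
    (PySem.List.pyRange 3 (m : Int) 1).foldl stepA (expT 3 len).toArray = (expT m len).toArray := by
  induction m with
  | zero => omega
  | succ m ih =>
    by_cases hm3 : 3 ≤ m
    · rw [show ((m + 1 : Nat) : Int) = (m : Int) + 1 by push_cast; ring]
      rw [PySem.List.pyRange_one_succ_right (by exact_mod_cast hm3), List.foldl_append]
      rw [ih hm3 (by omega)]
      simp only [List.foldl_cons, List.foldl_nil]
      exact step_exp len m hm3 (by omega)
    · have : m + 1 = 3 := by omega
      rw [this]
      rw [show ((3 : Nat) : Int) = (3 : Int) by norm_num]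
      rw [PySem.List.pyRange_one_eq_nil (by norm_num)]
      rw [List.foldl_nil]

-- the initial table, in cons form
theorem repl_eq (l : Nat) :
    (PySem.List.pyRange 0 ((l + 3 : Nat) : Int) 1).map (fun _ => ([0, 0] : List Int)) =
      [0, 0] :: [0, 0] :: [0, 0] :: List.replicate l [0, 0] := by
  rw [PySem.List.pyRange_one, List.map_map]
  rw [show (((l + 3 : Nat) : Int) - 0).toNat = l + 3 by omega]
  rw [show ((fun (_ : Int) => ([0, 0] : List Int)) ∘ fun (k : Nat) => (0 : Int) + (k : Int)) = fun (_ : Nat) => ([0, 0] : List Int) from rfl]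
  rw [List.map_const', List.length_range, show l + 3 = 3 + l by ring, List.replicate_add]
  rfl

-- the four initial assignments
theorem init_eq (R : List (List Int)) :
    setCell (setCell (setCell (setCell (([0, 0] :: [0, 0] :: [0, 0] :: R).toArray) 1 0 1) 1 1 1) 2 0 2) 2 1 2 =
      ([0, 0] :: [1, 1] :: [2, 2] :: R).toArray := by
  rw [show (1 : Int) = ((1 : Nat) : Int) from rfl, show (2 : Int) = ((2 : Nat) : Int) from rfl]
  rw [setCell_cast, setCell_cast, setCell_cast, setCell_cast]
  rfl

-- the filled table, in cons form at the front
theorem expT3 (l : Nat) :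
    expT 3 (l + 3) = [0, 0] :: [1, 1] :: [2, 2] :: List.replicate l ([0, 0] : List Int) := by
  unfold expT
  rw [show l + 3 = 3 + l by ring, List.range_add, List.map_append, List.map_map]
  have h1 : (List.range 3).map (fun j => if 1 ≤ j ∧ j < 3 then [G j, G j] else ([0, 0] : List Int)) =
      [[0, 0], [1, 1], [2, 2]] := by
    have g1 : G 1 = 1 := by unfold G; decide
    have g2 : G 2 = 2 := by unfold G; decide
    rw [show List.range 3 = [0, 1, 2] from rfl]
    simp [g1, g2]
  rw [h1]
  have h2 : ((fun j => if 1 ≤ j ∧ j < 3 then [G j, G j] else ([0, 0] : List Int)) ∘ fun x => 3 + x) =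
      (fun _ => ([0, 0] : List Int)) := by
    funext x
    simp only [Function.comp]
    simp
  rw [h2, List.map_const', List.length_range]
  rfl

theorem binary_sequence_spec : Claim_equal_binary_sequence := by
  intro n _ hpre
  unfold Pre_binary_sequence at hpre
  unfold Spec_binary_sequence binary_sequence binary_sequence_alt
  simp only []
  obtain ⟨l, hl⟩ : ∃ l : Nat, (n + 1).toNat = l + 3 := ⟨(n + 1).toNat - 3, by omega⟩
  have hn1 : n + 1 = ((l + 3 : Nat) : Int) := by omega
  rw [hn1, repl_eq, init_eq, ← expT3 l]
  rw [loop_inv (l + 3) (l + 3) (by omega) le_rfl]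
  rw [tblGet_neg_one, length_expT, show l + 3 - 1 = l + 2 by omega]
  rw [getD_expT (l + 3) (l + 3) (l + 2) (by omega)]
  rw [if_pos (show 1 ≤ l + 2 ∧ l + 2 < l + 3 by omega), pgetm1]
  rw [show (((l + 3 : Nat) : Int)).toNat = l + 3 by omega]
  rw [fastFib_eq]
  simp [G, show l + 2 + 1 = l + 3 by omega]

-- ===== VERDICT =====
theorem binary_sequence_raises : Claim_raises_binary_sequence := by
  unfold Claim_raises_binary_sequence
  constructor
  · intro n _ hr
    unfold Raises_binary_sequence at hr
    unfold Pre_binary_sequence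
    omega
  · refine ⟨by decide, by unfold Raises_binary_sequence pvRaiseWitness_binary_sequence; omega, ?_⟩
    rw [show binary_sequence_alt pvRaiseWitness_binary_sequence = (fastFib 1).1 from rfl, fastFib_eq]
    decide

-- self-check: the raise witness lies in Raises_ and B's port returns the stated literal there
theorem pvRaiseWitness_binary_sequence_ok :
    Raises_binary_sequence pvRaiseWitness_binary_sequence ∧
      binary_sequence_alt pvRaiseWitness_binary_sequence = pvRaiseWitnessOut_binary_sequence := by
  have h := binary_sequence_raises
  unfold Claim_raises_binary_sequence at h
  exact ⟨h.2.2.1, h.2.2.2⟩
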